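-- pv_equiv track=rewrite | github.com/kjh918/pcr_designer | src/pcr_desinger.py | build_pair_alignment_lines
-- ===== SOURCE A (Python) =====
-- def build_pair_alignment_lines(
--         ref_full: str,
--         primer_seq: str,
--         offset: int,
--         primer_label: str,
--         ref_label: str,
--     ):
--     """
--     ref_full: 그룹 전체 구간의 reference 서열 (한 줄)
--     primer_seq: 5'->3' primer 서열 (ref_full과 같은 방향으로 정렬된 것)
--     offset: primer가 ref_full 어디서 시작하는지 (0-based index)
--     primer_label, ref_label: 출력시 앞에 붙일 라벨
--     """
--     L = len(ref_full)
--
--     # primer / match 라인용 배열 (처음엔 공백)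
--     arr_primer = [" "] * L
--     arr_match = [" "] * L
--
--     for i, base in enumerate(primer_seq):
--         pos = offset + i
--         if 0 <= pos < L:
--             arr_primer[pos] = base
--             if base == ref_full[pos]:
--                 arr_match[pos] = "|"
--
--     line_primer = f"{primer_label}: " + "".join(arr_primer)
--     line_match  = " " * (len(primer_label) + 2) + "".join(arr_match)
--     line_ref    = f"{ref_label}: " + ref_full
--
--     return line_primer, line_match, line_ref
-- ===== SOURCE B (Python) =====
-- def build_pair_alignment_lines(
--         ref_full: str,
--         primer_seq: str,
--         offset: int,
--         primer_label: str,
--         ref_label: str,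
--     ):
--     L = len(ref_full)
--     lo = max(0, min(L, offset))
--     hi = max(lo, min(L, offset + len(primer_seq)))
--     visible = primer_seq[lo - offset:hi - offset]
--     match_str = "".join("|" if a == b else " " for a, b in zip(visible, ref_full[lo:hi]))
--     pad_l = " " * lo
--     pad_r = " " * (L - hi)
--     line_primer = f"{primer_label}: " + pad_l + visible + pad_r
--     line_match = " " * (len(primer_label) + 2) + pad_l + match_str + pad_r
--     line_ref = f"{ref_label}: " + ref_full
--     return line_primer, line_match, line_ref
-- ===== Notes on version B (the rewrite author's own statement) =====
-- stated objective: simpler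
-- what changed: Replaces the full-length mutable arrays and per-character index writes with a computed overlap window [lo,hi): slice the visible primer part, mark matches with a zip over the overlap, and assemble each line as pad + slice + pad.
import Mathlib
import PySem

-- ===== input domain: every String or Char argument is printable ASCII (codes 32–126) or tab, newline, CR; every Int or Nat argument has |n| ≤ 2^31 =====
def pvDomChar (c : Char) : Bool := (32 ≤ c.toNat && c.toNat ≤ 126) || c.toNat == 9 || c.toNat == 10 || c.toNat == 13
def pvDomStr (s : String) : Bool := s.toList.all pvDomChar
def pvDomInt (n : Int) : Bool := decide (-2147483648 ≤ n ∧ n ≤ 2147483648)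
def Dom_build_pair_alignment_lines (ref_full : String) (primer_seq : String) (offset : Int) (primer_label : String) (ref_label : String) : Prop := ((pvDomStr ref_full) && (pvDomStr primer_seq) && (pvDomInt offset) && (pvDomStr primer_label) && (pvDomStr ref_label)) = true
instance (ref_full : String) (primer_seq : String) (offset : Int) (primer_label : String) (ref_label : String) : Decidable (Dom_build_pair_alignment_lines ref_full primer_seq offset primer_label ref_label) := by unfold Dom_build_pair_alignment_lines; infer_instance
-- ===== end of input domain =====

-- B replaces A's full-length mutable arrays and per-character index writes with an
-- overlap window [lo,hi): slice + zip + pad concatenation (objective: simpler).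

-- ===== PORT A =====
-- one iteration of A's for-loop body at primer char c, position pos = offset + i
def pvStepA (ref : List Char) (L : Nat) (c : Char) (pos : Int) (st : List Char × List Char) : List Char × List Char :=
  if 0 ≤ pos ∧ pos < (L : Int) then
    (st.1.set pos.toNat c,
     if c = ref.getD pos.toNat ' ' then st.2.set pos.toNat '|' else st.2)
  else st

-- A's for-loop over enumerate(primer_seq): pos carries offset + i
def pvLoopA (ref : List Char) (L : Nat) : List Char → Int → List Char × List Char → List Char × List Char
  | [], _, st => st
  | c :: cs, pos, st => pvLoopA ref L cs (pos + 1) (pvStepA ref L c pos st)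

def build_pair_alignment_lines (ref_full : String) (primer_seq : String) (offset : Int) (primer_label : String) (ref_label : String) : String × String × String :=
  let ref := ref_full.toList
  let L := ref.length
  let st := pvLoopA ref L primer_seq.toList offset (List.replicate L ' ', List.replicate L ' ')
  (String.mk (primer_label.toList ++ [':', ' '] ++ st.1),
   String.mk (List.replicate (primer_label.toList.length + 2) ' ' ++ st.2),
   String.mk (ref_label.toList ++ [':', ' '] ++ ref))

-- ===== PORT B =====
-- Python slices primer_seq[lo-offset:hi-offset] / ref_full[lo:hi] with 0 ≤ lo-offset ≤ hi-offset
-- are exactly drop + take here.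
def build_pair_alignment_lines_alt (ref_full : String) (primer_seq : String) (offset : Int) (primer_label : String) (ref_label : String) : String × String × String :=
  let ref := ref_full.toList
  let L : Int := ref.length
  let lo : Int := max 0 (min L offset)
  let hi : Int := max lo (min L (offset + primer_seq.toList.length))
  let visible := (primer_seq.toList.drop (lo - offset).toNat).take (hi - lo).toNat
  let refSlice := (ref.drop lo.toNat).take (hi - lo).toNat
  let matchStr := (visible.zip refSlice).map (fun p => if p.1 = p.2 then '|' else ' ')
  let padL := List.replicate lo.toNat ' '
  let padR := List.replicate (L - hi).toNat ' '
  (String.mk (primer_label.toList ++ [':', ' '] ++ (padL ++ visible ++ padR)),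
   String.mk (List.replicate (primer_label.toList.length + 2) ' ' ++ (padL ++ matchStr ++ padR)),
   String.mk (ref_label.toList ++ [':', ' '] ++ ref))

-- ===== PRECONDITION & SPEC =====
def Spec_build_pair_alignment_lines (ref_full : String) (primer_seq : String) (offset : Int) (primer_label : String) (ref_label : String) (out : String × String × String) : Prop := out = build_pair_alignment_lines_alt ref_full primer_seq offset primer_label ref_label
instance (ref_full : String) (primer_seq : String) (offset : Int) (primer_label : String) (ref_label : String) (out : String × String × String) : Decidable (Spec_build_pair_alignment_lines ref_full primer_seq offset primer_label ref_label out) := by unfold Spec_build_pair_alignment_lines; infer_instance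

-- ===== CLAIM (what is proved, stated in full; the proofs are below) =====
def Claim_equal_build_pair_alignment_lines : Prop := ∀ (ref_full : String) (primer_seq : String) (offset : Int) (primer_label : String) (ref_label : String), Dom_build_pair_alignment_lines ref_full primer_seq offset primer_label ref_label → Spec_build_pair_alignment_lines ref_full primer_seq offset primer_label ref_label (build_pair_alignment_lines ref_full primer_seq offset primer_label ref_label)

-- ===== LEMMAS AND PROOFS =====

theorem pvLoopA_length (ref : List Char) (L : Nat) :
    ∀ (cs : List Char) (pos : Int) (st : List Char × List Char),
      (pvLoopA ref L cs pos st).1.length = st.1.length ∧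
      (pvLoopA ref L cs pos st).2.length = st.2.length := by
  intro cs
  induction cs with
  | nil => intro pos st; simp [pvLoopA]
  | cons c cs ih =>
    intro pos st
    have h := ih (pos + 1) (pvStepA ref L c pos st)
    simp only [pvLoopA] at *
    constructor
    · rw [h.1]; unfold pvStepA; split <;> simp
    · rw [h.2]; unfold pvStepA; split
      · dsimp only; split_ifs <;> simp
      · rfl

-- pointwise characterisation of A's loop result
theorem pvLoopA_get? (ref : List Char) (L : Nat) :
    ∀ (cs : List Char) (pos : Int) (aP aM : List Char),
      aP.length = L → aM.length = L → ∀ (j : Nat),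
      ((pvLoopA ref L cs pos (aP, aM)).1[j]? =
        (if pos ≤ (j : Int) ∧ (j : Int) < pos + cs.length ∧ j < L
         then cs[((j : Int) - pos).toNat]? else aP[j]?)) ∧
      ((pvLoopA ref L cs pos (aP, aM)).2[j]? =
        (if pos ≤ (j : Int) ∧ (j : Int) < pos + cs.length ∧ j < L
         then (if cs.getD ((j : Int) - pos).toNat ' ' = ref.getD j ' '
               then some '|' else aM[j]?)
         else aM[j]?)) := by
  intro cs
  induction cs with
  | nil =>
    intro pos aP aM hP hM j
    have hf : ¬ (pos ≤ (j : Int) ∧ (j : Int) < pos + (([] : List Char).length : Int) ∧ j < L) := by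
      simp; omega
    constructor <;> (simp only [pvLoopA]; rw [if_neg hf])
  | cons c cs ih =>
    intro pos aP aM hP hM j
    by_cases hg : 0 ≤ pos ∧ pos < (L : Int)
    · -- the first write happens
      have hset : pvStepA ref L c pos (aP, aM) =
          (aP.set pos.toNat c,
           if c = ref.getD pos.toNat ' ' then aM.set pos.toNat '|' else aM) := by
        simp [pvStepA, hg]
      have hP' : (aP.set pos.toNat c).length = L := by simp [hP]
      have hM' : (if c = ref.getD pos.toNat ' ' then aM.set pos.toNat '|' else aM).length = L := by
        split_ifs <;> simp [hM]
      have h := ih (pos + 1) _ _ hP' hM' j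
      simp only [pvLoopA, hset] at *
      by_cases hj : (j : Int) = pos
      · -- j is exactly the written position
        have hjn : pos.toNat = j := by omega
        have hidx : ((j : Int) - pos).toNat = 0 := by omega
        have hjL : j < L := by omega
        have hcond : pos ≤ (j : Int) ∧ (j : Int) < pos + ((c :: cs).length : Int) ∧ j < L :=
          ⟨by omega, by simp only [List.length_cons]; push_cast; omega, hjL⟩
        constructor
        · rw [h.1]
          rw [if_neg (by omega), if_pos hcond]
          simp only [hidx, hjn]
          rw [List.getElem?_set_self (by omega)]
          simp
        · rw [h.2]
          rw [if_neg (by omega), if_pos hcond]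
          simp only [hidx, List.getD_cons_zero, hjn]
          split_ifs with he
          · rw [List.getElem?_set_self (by omega)]
          · rfl
      · -- j ≠ pos
        have hne : j ≠ pos.toNat ∨ ¬ (0 ≤ pos) := by omega
        have hsP : (aP.set pos.toNat c)[j]? = aP[j]? := by
          apply List.getElem?_set_ne; omega
        have hsM : (if c = ref.getD pos.toNat ' ' then aM.set pos.toNat '|' else aM)[j]? = aM[j]? := by
          split_ifs with he
          · apply List.getElem?_set_ne; omega
          · rfl
        by_cases hw : pos + 1 ≤ (j : Int) ∧ (j : Int) < pos + 1 + cs.length ∧ j < L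
        · have hidx : ((j : Int) - pos).toNat = ((j : Int) - (pos + 1)).toNat + 1 := by omega
          have hcond : pos ≤ (j : Int) ∧ (j : Int) < pos + ((c :: cs).length : Int) ∧ j < L :=
            ⟨by omega, by simp only [List.length_cons]; push_cast; omega, hw.2.2⟩
          constructor
          · rw [h.1, if_pos hw, if_pos hcond, hidx]
            simp
          · rw [h.2, if_pos hw, if_pos hcond, hidx, hsM]
            simp only [List.getD_cons_succ]
        · have hw2 : ¬ (pos ≤ (j : Int) ∧ (j : Int) < pos + (c :: cs).length ∧ j < L) := by
            simp only [List.length_cons]; push_cast; omega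
          constructor
          · rw [h.1, if_neg hw, if_neg hw2, hsP]
          · rw [h.2, if_neg hw, if_neg hw2, hsM]
    · -- guard false: no write
      have hset : pvStepA ref L c pos (aP, aM) = (aP, aM) := by simp [pvStepA, hg]
      have h := ih (pos + 1) aP aM hP hM j
      simp only [pvLoopA, hset] at *
      rcases (by omega : pos < 0 ∨ (L : Int) ≤ pos) with hneg | hge
      · by_cases hw : pos + 1 ≤ (j : Int) ∧ (j : Int) < pos + 1 + cs.length ∧ j < L
        · have hidx : ((j : Int) - pos).toNat = ((j : Int) - (pos + 1)).toNat + 1 := by omega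
          have hcond : pos ≤ (j : Int) ∧ (j : Int) < pos + ((c :: cs).length : Int) ∧ j < L :=
            ⟨by omega, by simp only [List.length_cons]; push_cast; omega, hw.2.2⟩
          constructor
          · rw [h.1, if_pos hw, if_pos hcond, hidx]
            simp
          · rw [h.2, if_pos hw, if_pos hcond, hidx]
            simp only [List.getD_cons_succ]
        · have hnw1 : ¬ (pos ≤ (j : Int) ∧ (j : Int) < pos + ((c :: cs).length : Int) ∧ j < L) := by
            simp only [List.length_cons]; push_cast; omega
          constructor
          · rw [h.1, if_neg hw, if_neg hnw1]
          · rw [h.2, if_neg hw, if_neg hnw1]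
      · have hnw1 : ¬ (pos ≤ (j : Int) ∧ (j : Int) < pos + ((c :: cs).length : Int) ∧ j < L) := by
          omega
        have hnw2 : ¬ (pos + 1 ≤ (j : Int) ∧ (j : Int) < pos + 1 + cs.length ∧ j < L) := by
          omega
        constructor
        · rw [h.1, if_neg hnw2, if_neg hnw1]
        · rw [h.2, if_neg hnw2, if_neg hnw1]


theorem pvZipMap_get? (f : Char × Char → Char) :
    ∀ (u v : List Char) (i : Nat),
      ((u.zip v).map f)[i]? =
        match u[i]?, v[i]? with
        | some a, some b => some (f (a, b))
        | _, _ => none := by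
  intro u
  induction u with
  | nil => intro v i; simp
  | cons a u ih =>
    intro v i
    cases v with
    | nil => simp
    | cons b v =>
      cases i with
      | zero => simp
      | succ i => simpa using ih v i

-- A's loop result equals B's pad ++ slice ++ pad assembly, both components
theorem pvMain (ref ps : List Char) (offset : Int) (lo hi : Int)
    (hlo : lo = max 0 (min (ref.length : Int) offset))
    (hhi : hi = max lo (min (ref.length : Int) (offset + ps.length))) :
    (pvLoopA ref ref.length ps offset
        (List.replicate ref.length ' ', List.replicate ref.length ' ')).1 =
      List.replicate lo.toNat ' ' ++
        ((ps.drop (lo - offset).toNat).take (hi - lo).toNat) ++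
        List.replicate ((ref.length : Int) - hi).toNat ' ' ∧
    (pvLoopA ref ref.length ps offset
        (List.replicate ref.length ' ', List.replicate ref.length ' ')).2 =
      List.replicate lo.toNat ' ' ++
        ((((ps.drop (lo - offset).toNat).take (hi - lo).toNat).zip
            ((ref.drop lo.toNat).take (hi - lo).toNat)).map
          (fun p => if p.1 = p.2 then '|' else ' ')) ++
        List.replicate ((ref.length : Int) - hi).toNat ' ' := by
  have hL0 : (0 : Int) ≤ lo := by omega
  have hlh : lo ≤ hi := by omega
  have hhL : hi ≤ (ref.length : Int) := by omega
  have hoff : lo < hi → offset ≤ lo ∧ hi ≤ offset + (ps.length : Int) := by omega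
  have hvlen : ((ps.drop (lo - offset).toNat).take (hi - lo).toNat).length = (hi - lo).toNat := by
    simp only [List.length_take, List.length_drop]
    rcases lt_or_ge lo hi with hlt | hge
    · have := hoff hlt; omega
    · omega
  have hrlen : ((ref.drop lo.toNat).take (hi - lo).toNat).length = (hi - lo).toNat := by
    simp only [List.length_take, List.length_drop]; omega
  have hlen := pvLoopA_length ref ref.length ps offset
      (List.replicate ref.length ' ', List.replicate ref.length ' ')
  have hchar := pvLoopA_get? ref ref.length ps offset
      (List.replicate ref.length ' ') (List.replicate ref.length ' ')
      (by simp) (by simp)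
  have hwin : ∀ j : Nat, (offset ≤ (j : Int) ∧ (j : Int) < offset + ps.length ∧ j < ref.length)
      ↔ (lo ≤ (j : Int) ∧ (j : Int) < hi) := by intro j; omega
  constructor
  · apply List.ext_getElem?
    intro j
    rw [(hchar j).1]
    rw [List.getElem?_append, List.getElem?_append]
    simp only [List.length_replicate, List.getElem?_replicate, List.length_append, hvlen,
      List.getElem?_take, List.getElem?_drop]
    by_cases hjL : j < ref.length
    · by_cases hw : lo ≤ (j : Int) ∧ (j : Int) < hi
      · rw [if_pos (((hwin j).2 hw))]
        have h2 : j < lo.toNat + (hi - lo).toNat := by omega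
        have h1 : ¬ j < lo.toNat := by omega
        have h3 : j - lo.toNat < (hi - lo).toNat := by omega
        rw [if_pos h2, if_neg h1, if_pos h3]
        congr 1
        omega
      · rw [if_neg (fun hc => hw ((hwin j).1 hc))]
        split_ifs <;> first | rfl | omega
    · rw [if_neg (by omega : ¬ (offset ≤ (j : Int) ∧ (j : Int) < offset + ps.length ∧ j < ref.length))]
      split_ifs <;> first | rfl | omega
  · apply List.ext_getElem?
    intro j
    rw [(hchar j).2]
    rw [List.getElem?_append, List.getElem?_append]
    simp only [List.length_replicate, List.getElem?_replicate, List.length_append, List.length_map,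
      List.length_zip, hvlen, hrlen, min_self, pvZipMap_get?, List.getElem?_take, List.getElem?_drop]
    by_cases hjL : j < ref.length
    · by_cases hw : lo ≤ (j : Int) ∧ (j : Int) < hi
      · rw [if_pos (((hwin j).2 hw))]
        have h2 : j < lo.toNat + (hi - lo).toNat := by omega
        have h1 : ¬ j < lo.toNat := by omega
        have h3 : j - lo.toNat < (hi - lo).toNat := by omega
        rw [if_pos h2, if_neg h1, if_pos h3, if_pos h3]
        have hidx1 : (lo - offset).toNat + (j - lo.toNat) = ((j : Int) - offset).toNat := by
          have := hoff (by omega); omega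
        have hidx2 : lo.toNat + (j - lo.toNat) = j := by omega
        rw [hidx1, hidx2]
        have hps : (((j : Int) - offset).toNat) < ps.length := by
          have := hoff (by omega); omega
        have hrj : j < ref.length := hjL
        rw [List.getElem?_eq_getElem hps, List.getElem?_eq_getElem hrj]
        simp only [List.getD_eq_getElem?_getD, List.getElem?_eq_getElem hps,
          List.getElem?_eq_getElem hrj, Option.getD_some]
        split_ifs <;> simp_all
      · rw [if_neg (fun hc => hw ((hwin j).1 hc))]
        split_ifs <;> first | rfl | omega
    · rw [if_neg (by omega : ¬ (offset ≤ (j : Int) ∧ (j : Int) < offset + ps.length ∧ j < ref.length))]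
      split_ifs <;> first | rfl | omega

-- ===== VERDICT (by name: the statement is the Claim_ definition above) =====
theorem build_pair_alignment_lines_spec : Claim_equal_build_pair_alignment_lines := by
  intro ref_full primer_seq offset primer_label ref_label _
  unfold Spec_build_pair_alignment_lines build_pair_alignment_lines build_pair_alignment_lines_alt
  have h := pvMain ref_full.toList primer_seq.toList offset _ _ rfl rfl
  simp only [h.1, h.2]
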